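-- pv_equiv track=rewrite | github.com/MrBrantCode/unitest_baseline | mut_generate/mist_train_cf/cf_17144/solution.py | sum_odd_primes
-- ===== SOURCE A (Python) =====
-- def is_prime(n):
--     if n <= 1:
--         return False
--     if n <= 3:
--         return True
--     if n % 2 == 0 or n % 3 == 0:
--         return False
--     i = 5
--     while i * i <= n:
--         if n % i == 0 or n % (i + 2) == 0:
--             return False
--         i += 6
--     return True
--
-- def sum_odd_primes(data, row=0, col=0):
--     if row >= len(data):
--         return 0
--     if col >= len(data[row]):
--         return sum_odd_primes(data, row+1, 0)
--     value = data[row][col]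
--     if value % 2 == 1 and is_prime(col):
--         return value + sum_odd_primes(data, row, col+1)
--     return sum_odd_primes(data, row, col+1)
-- ===== SOURCE B (Python) =====
-- def is_prime(n):
--     if n <= 1:
--         return False
--     if n <= 3:
--         return True
--     if n % 2 == 0 or n % 3 == 0:
--         return False
--     i = 5
--     while i * i <= n:
--         if n % i == 0 or n % (i + 2) == 0:
--             return False
--         i += 6
--     return True
--
-- def sum_odd_primes(data, row=0, col=0):
--     # the prime column indices are computed ONCE; each row is scanned only at those columns
--     width = 0
--     for cells in data:
--         if len(cells) > width:
--             width = len(cells)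
--     primes = [c for c in range(width) if is_prime(c)]
--     total = 0
--     for r, cells in enumerate(data):
--         if r < row:
--             continue
--         start = col if r == row else 0
--         L = len(cells)
--         for c in primes:
--             if c < L and c >= start:
--                 v = cells[c]
--                 if v % 2 == 1:
--                     total += v
--     return total
-- ===== Notes on version B (the rewrite author's own statement) =====
-- stated objective: alternative
-- what changed: Replaces the cell-by-cell recursion that trial-divides the column index for every odd cell with a list of the prime column indices computed once, followed by one iterative pass that reads each row only at those columns; B also iterates rows forward with enumerate, so a negative starting row never re-reads rows through Python's negative-index wraparound.
-- intended difference: For a negative starting row (with -len(data) <= row < 0), A's negative indexing visits the last -row rows twice (the first of them from column col); D_ holds exactly when the odd values at prime column indices in that duplicated part sum to a nonzero value, and there A returns the grid total plus that sum while B counts every row exactly once and returns the plain total, which is the intended sum. — e.g. on sum_odd_primes([[0, 0, 3]], -1, 0): A returns 6, B returns 3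
import Mathlib
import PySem

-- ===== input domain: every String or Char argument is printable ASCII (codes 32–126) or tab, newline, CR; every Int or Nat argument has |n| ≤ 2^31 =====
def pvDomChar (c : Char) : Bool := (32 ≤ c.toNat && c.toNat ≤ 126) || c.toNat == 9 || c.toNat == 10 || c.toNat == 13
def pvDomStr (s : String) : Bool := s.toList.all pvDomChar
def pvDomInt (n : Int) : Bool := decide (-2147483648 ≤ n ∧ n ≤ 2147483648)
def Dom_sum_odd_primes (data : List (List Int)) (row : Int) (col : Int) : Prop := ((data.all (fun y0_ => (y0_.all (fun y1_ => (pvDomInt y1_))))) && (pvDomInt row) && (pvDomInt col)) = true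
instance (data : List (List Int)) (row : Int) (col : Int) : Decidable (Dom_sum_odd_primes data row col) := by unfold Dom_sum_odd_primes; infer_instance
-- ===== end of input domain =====

-- B replaces A's cell-by-cell recursion (with a trial division per odd cell) by a list of the
-- prime column indices computed once, then one forward pass over the rows that reads only those
-- columns (objective: alternative; return value only).

-- ===== PORT A =====
-- A's 6k±1 trial-division loop 'while i*i <= n'.  All values are positive here (called with
-- 5 ≤ i and 3 < n), so Nat arithmetic is exact for Python's `%` and `<=` on ints.
def isPrimeLoop (n : Nat) (i : Nat) : Bool :=
  if h : i * i ≤ n then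
    if n % i = 0 || n % (i + 2) = 0 then false
    else isPrimeLoop n (i + 6)
  else true
termination_by n + 1 - i * i
decreasing_by
  have h2 : (i + 6) * (i + 6) = i * i + (12 * i + 36) := by ring
  omega

def is_primeL (n : Int) : Bool :=
  if n ≤ 1 then false
  else if n ≤ 3 then true
  else if PySem.Int.mod n 2 = 0 || PySem.Int.mod n 3 = 0 then false
  else isPrimeLoop n.toNat 5   -- here 3 < n, so n.toNat is exact

-- maximum row length; used by A's termination measure and by B's width pass
def maxWidth (data : List (List Int)) : Nat :=
  data.foldl (fun m cells => max m cells.length) 0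

theorem pv_foldl_max_ge (l : List (List Int)) : ∀ m : Nat, m ≤ l.foldl (fun a c => max a c.length) m := by
  induction l with
  | nil => intro m; simp
  | cons y ys ih => intro m; exact le_trans (le_max_left m y.length) (ih _)

theorem le_maxWidth_of_mem {data : List (List Int)} {cells : List Int}
    (h : cells ∈ data) : cells.length ≤ maxWidth data := by
  unfold maxWidth
  suffices H : ∀ (l : List (List Int)) (m : Nat), cells ∈ l → cells.length ≤ l.foldl (fun a c => max a c.length) m from H data 0 h
  intro l
  induction l with
  | nil => intro m hm; cases hm
  | cons y ys ih =>
    intro m hm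
    rcases List.mem_cons.mp hm with rfl | hm
    · exact le_trans (le_max_right m cells.length) (pv_foldl_max_ge ys _)
    · exact ih _ hm

def sum_odd_primes (data : List (List Int)) (row : Int) (col : Int) : Int :=
  if h1 : (data.length : Int) ≤ row then 0
  else
    match hget : PySem.List.pyGet? data row with
    | none => 0          -- Python raises IndexError here (outside Pre_)
    | some cells =>
      if h2 : (cells.length : Int) ≤ col then sum_odd_primes data (row + 1) 0
      else
        match PySem.List.pyGet? cells col with
        | none => 0      -- Python raises IndexError here (outside Pre_)
        | some v =>
          if PySem.Int.mod v 2 = 1 ∧ is_primeL col = true then v + sum_odd_primes data row (col + 1)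
          else sum_odd_primes data row (col + 1)
termination_by (((data.length : Int) - row).toNat, ((maxWidth data : Int) - col).toNat)
decreasing_by
  · left; omega
  · have hm : cells.length ≤ maxWidth data :=
      le_maxWidth_of_mem (PySem.List.mem_of_pyGet?_eq_some _ hget)
    right; omega
  · have hm : cells.length ≤ maxWidth data :=
      le_maxWidth_of_mem (PySem.List.mem_of_pyGet?_eq_some _ hget)
    right; omega

-- ===== PORT B =====
def sum_odd_primes_alt (data : List (List Int)) (row : Int) (col : Int) : Int :=
  let width := maxWidth data
  let primes := (List.range width).filter (fun (c : Nat) => is_primeL (c : Int))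
  (PySem.List.enumerate data).foldl (fun total p =>
    if p.1 < row then total
    else
      let start := if p.1 = row then col else 0
      primes.foldl (fun (t : Int) (c : Nat) =>
        if (c : Int) < (p.2.length : Int) ∧ start ≤ (c : Int) then
          (if PySem.Int.mod (PySem.List.pyGetD p.2 (c : Int) 0) 2 = 1
           then t + PySem.List.pyGetD p.2 (c : Int) 0 else t)
        else t) total) 0

-- Spec-side helpers (used by D_ and the proofs): the odd-value-at-prime-column contribution
-- of one row from column index `col` on, and the row sum both ports are reduced to.
def tailSum (cells : List Int) (col : Int) : Int :=
  ∑ k ∈ Finset.range cells.length,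
    if col ≤ (k : Int) ∧ is_primeL (k : Int) = true ∧ PySem.Int.mod (cells.getD k 0) 2 = 1
    then cells.getD k 0 else 0

def F (data : List (List Int)) (ρ : Int) (col : Int) : Int :=
  ∑ r ∈ Finset.range data.length,
    if (r : Int) < ρ then 0
    else tailSum (data.getD r []) (if (r : Int) = ρ then col else 0)

-- ===== PRECONDITION & SPEC =====
-- Pre_ excludes exactly the inputs on which A raises IndexError: a starting row index below
-- -len(data), or a starting col index below -len(data[row]) for the first row A reads.
def Pre_sum_odd_primes (data : List (List Int)) (row : Int) (col : Int) : Prop :=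
  (data.length : Int) ≤ row ∨
    (-(data.length : Int) ≤ row ∧
      ∀ cells ∈ PySem.List.pyGet? data row,
        ((cells.length : Int) ≤ col ∨ -(cells.length : Int) ≤ col))
instance (data : List (List Int)) (row : Int) (col : Int) : Decidable (Pre_sum_odd_primes data row col) := by
  unfold Pre_sum_odd_primes; infer_instance
def pvWitness_sum_odd_primes : List (List Int) × Int × Int := ([[1, 2, 3], [4, 5, 7]], 0, 0)

-- For -len(data) ≤ row < 0 A's Python negative indexing visits the last -row rows twice (the
-- first of them from column col), so A returns the grid total plus that duplicated part, while
-- B counts every row once and returns the plain total, the intended sum; D_ holds exactly when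
-- that duplicated part — F data (len(data)+row) col, the odd values at prime column indices in
-- the twice-visited rows — is nonzero.
def D_sum_odd_primes (data : List (List Int)) (row : Int) (col : Int) : Prop :=
  row < 0 ∧ F data ((data.length : Int) + row) col ≠ 0
instance (data : List (List Int)) (row : Int) (col : Int) : Decidable (D_sum_odd_primes data row col) := by
  unfold D_sum_odd_primes; infer_instance

def Spec_sum_odd_primes (data : List (List Int)) (row : Int) (col : Int) (out : Int) : Prop :=
  ¬ D_sum_odd_primes data row col → out = sum_odd_primes_alt data row col
instance (data : List (List Int)) (row : Int) (col : Int) (out : Int) : Decidable (Spec_sum_odd_primes data row col out) := by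
  unfold Spec_sum_odd_primes; infer_instance

def pvDiffWitness_sum_odd_primes : List (List Int) × Int × Int := ([[0, 0, 3]], -1, 0)
def pvDiffWitnessOut_sum_odd_primes : Int × Int := (6, 3)

-- ===== CLAIM (what is proved, stated in full; the proofs are below) =====
def Claim_unchanged_sum_odd_primes : Prop := ∀ (data : List (List Int)) (row : Int) (col : Int), Dom_sum_odd_primes data row col → Pre_sum_odd_primes data row col → Spec_sum_odd_primes data row col (sum_odd_primes data row col)
def Claim_changed_sum_odd_primes : Prop := Dom_sum_odd_primes (pvDiffWitness_sum_odd_primes.1) (pvDiffWitness_sum_odd_primes.2.1) (pvDiffWitness_sum_odd_primes.2.2) ∧ Pre_sum_odd_primes (pvDiffWitness_sum_odd_primes.1) (pvDiffWitness_sum_odd_primes.2.1) (pvDiffWitness_sum_odd_primes.2.2) ∧ D_sum_odd_primes (pvDiffWitness_sum_odd_primes.1) (pvDiffWitness_sum_odd_primes.2.1) (pvDiffWitness_sum_odd_primes.2.2) ∧ sum_odd_primes (pvDiffWitness_sum_odd_primes.1) (pvDiffWitness_sum_odd_primes.2.1) (pvDiffWitness_sum_odd_primes.2.2) = pvDiffWitnessOut_sum_odd_primes.1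 ∧ sum_odd_primes_alt (pvDiffWitness_sum_odd_primes.1) (pvDiffWitness_sum_odd_primes.2.1) (pvDiffWitness_sum_odd_primes.2.2) = pvDiffWitnessOut_sum_odd_primes.2 ∧ pvDiffWitnessOut_sum_odd_primes.1 ≠ pvDiffWitnessOut_sum_odd_primes.2

def Claim_exact_sum_odd_primes : Prop := ∀ (data : List (List Int)) (row : Int) (col : Int), Dom_sum_odd_primes data row col → Pre_sum_odd_primes data row col → D_sum_odd_primes data row col → sum_odd_primes data row col ≠ sum_odd_primes_alt data row col

-- ===== LEMMAS AND PROOFS =====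


theorem is_primeL_two_le {m : Int} (h : is_primeL m = true) : 2 ≤ m := by
  by_contra hc
  unfold is_primeL at h
  rw [if_pos (by omega)] at h
  exact Bool.false_ne_true h

theorem A_stop {data : List (List Int)} {row col : Int}
    (h : (data.length : Int) ≤ row) : sum_odd_primes data row col = 0 := by
  rw [sum_odd_primes.eq_def, dif_pos h]

theorem tailSum_of_ge {cells : List Int} {col : Int}
    (h : (cells.length : Int) ≤ col) : tailSum cells col = 0 := by
  unfold tailSum
  apply Finset.sum_eq_zero
  intro k hk
  rw [if_neg]
  rintro ⟨h1, -, -⟩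
  have := Finset.mem_range.mp hk
  omega

theorem tailSum_nonpos {cells : List Int} {col : Int} (h : col ≤ 0) :
    tailSum cells col = tailSum cells 0 := by
  unfold tailSum
  apply Finset.sum_congr rfl
  intro k hk
  exact if_congr ⟨fun ⟨_, h2, h3⟩ => ⟨by omega, h2, h3⟩, fun ⟨_, h2, h3⟩ => ⟨by omega, h2, h3⟩⟩ rfl rfl

theorem tailSum_peel {cells : List Int} {col : Int} (h0 : 0 ≤ col)
    (hlt : col < (cells.length : Int)) :
    tailSum cells col =
      (if PySem.Int.mod (cells.getD col.toNat 0) 2 = 1 ∧ is_primeL col = true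
       then cells.getD col.toNat 0 else 0) + tailSum cells (col + 1) := by
  unfold tailSum
  have hmem : col.toNat ∈ Finset.range cells.length := by
    rw [Finset.mem_range]; omega
  rw [← Finset.add_sum_erase _ _ hmem, ← Finset.add_sum_erase _ _ hmem]
  have hcast : ((col.toNat : Nat) : Int) = col := by omega
  have h1 : (if col + 1 ≤ ((col.toNat : Nat) : Int) ∧ is_primeL ((col.toNat : Nat) : Int) = true ∧
      PySem.Int.mod (cells.getD col.toNat 0) 2 = 1 then cells.getD col.toNat 0 else 0) = 0 :=
    if_neg (by rintro ⟨h, -, -⟩; omega)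
  rw [h1, zero_add]
  congr 1
  · rw [hcast]
    exact if_congr ⟨fun ⟨_, h2, h3⟩ => ⟨h3, h2⟩, fun ⟨h3, h2⟩ => ⟨le_refl col, h2, h3⟩⟩ rfl rfl
  · refine Finset.sum_congr rfl fun k hk => ?_
    have hne : k ≠ col.toNat := (Finset.mem_erase.mp hk).1
    exact if_congr ⟨fun ⟨h1, h2, h3⟩ => ⟨by omega, h2, h3⟩,
      fun ⟨h1, h2, h3⟩ => ⟨by omega, h2, h3⟩⟩ rfl rfl

theorem A_col_ge {data : List (List Int)} {row : Int} {cells : List Int}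
    (hrow : ¬ (data.length : Int) ≤ row)
    (hget : PySem.List.pyGet? data row = some cells) :
    ∀ (col : Int), 0 ≤ col →
      sum_odd_primes data row col = tailSum cells col + sum_odd_primes data (row + 1) 0 := by
  suffices H : ∀ (fuel : Nat) (col : Int), 0 ≤ col → cells.length ≤ col.toNat + fuel →
      sum_odd_primes data row col = tailSum cells col + sum_odd_primes data (row + 1) 0 from
    fun col h0 => H cells.length col h0 (by omega)
  intro fuel
  induction fuel with
  | zero =>
    intro col h0 hb
    have hge : (cells.length : Int) ≤ col := by omega
    rw [sum_odd_primes.eq_def, dif_neg hrow]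
    split
    next heq => rw [hget] at heq; cases heq
    next cells' heq =>
      rw [hget] at heq; injection heq with h; subst h
      rw [dif_pos hge, tailSum_of_ge hge, zero_add]
  | succ fuel ih =>
    intro col h0 hb
    by_cases hge : (cells.length : Int) ≤ col
    · rw [sum_odd_primes.eq_def, dif_neg hrow]
      split
      next heq => rw [hget] at heq; cases heq
      next cells' heq =>
        rw [hget] at heq; injection heq with h; subst h
        rw [dif_pos hge, tailSum_of_ge hge, zero_add]
    · have hlt : col < (cells.length : Int) := by omega
      rw [sum_odd_primes.eq_def, dif_neg hrow]
      split
      next heq => rw [hget] at heq; cases heq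
      next cells' heq =>
        rw [hget] at heq; injection heq with h; subst h
        rw [dif_neg hge]
        split
        next heq2 =>
          rw [PySem.List.pyGet?_eq_some_getElem cells h0 hlt] at heq2; cases heq2
        next v heq2 =>
          rw [PySem.List.pyGet?_eq_some_getElem cells h0 hlt] at heq2
          injection heq2 with hv
          have hgd : cells.getD col.toNat 0 = v := by
            rw [List.getD_eq_getElem cells 0 (by omega), hv]
          rw [tailSum_peel h0 hlt, ih (col + 1) (by omega) (by omega), hgd]
          split <;> ring

theorem A_col_neg {data : List (List Int)} {row : Int} {cells : List Int}
    (hrow : ¬ (data.length : Int) ≤ row)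
    (hget : PySem.List.pyGet? data row = some cells) :
    ∀ (col : Int), -(cells.length : Int) ≤ col → col ≤ 0 →
      sum_odd_primes data row col = sum_odd_primes data row 0 := by
  suffices H : ∀ (fuel : Nat) (col : Int), -(cells.length : Int) ≤ col → col ≤ 0 →
      (-col).toNat ≤ fuel → sum_odd_primes data row col = sum_odd_primes data row 0 from
    fun col h1 h2 => H (-col).toNat col h1 h2 (le_refl _)
  intro fuel
  induction fuel with
  | zero => intro col h1 h2 hb; have : col = 0 := by omega
            rw [this]
  | succ fuel ih =>
    intro col h1 h2 hb
    by_cases hz : col = 0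
    · rw [hz]
    · have hneg : col < 0 := by omega
      have hlen : 0 < (cells.length : Int) := by omega
      obtain ⟨v, hv⟩ : ∃ v, PySem.List.pyGet? cells col = some v := by
        cases hpg : PySem.List.pyGet? cells col with
        | some v => exact ⟨v, rfl⟩
        | none =>
          rw [PySem.List.pyGet?_eq_none_iff] at hpg
          exact absurd (by constructor <;> omega) hpg
      rw [sum_odd_primes.eq_def, dif_neg hrow]
      split
      next heq => rw [hget] at heq; cases heq
      next cells' heq =>
        rw [hget] at heq; injection heq with h; subst h
        rw [dif_neg (by omega)]
        split
        next heq2 => rw [hv] at heq2; cases heq2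
        next v' heq2 =>
          rw [if_neg (by rintro ⟨-, hp⟩; have := is_primeL_two_le hp; omega)]
          exact ih (col + 1) (by omega) (by omega) (by omega)

theorem F_of_ge {data : List (List Int)} {ρ col : Int}
    (h : (data.length : Int) ≤ ρ) : F data ρ col = 0 := by
  unfold F
  apply Finset.sum_eq_zero
  intro r hr
  have := Finset.mem_range.mp hr
  rw [if_pos (by omega)]

theorem F_peel {data : List (List Int)} {ρ col : Int} (h0 : 0 ≤ ρ)
    (hlt : ρ < (data.length : Int)) :
    F data ρ col = tailSum (data.getD ρ.toNat []) col + F data (ρ + 1) 0 := by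
  unfold F
  have hmem : ρ.toNat ∈ Finset.range data.length := by rw [Finset.mem_range]; omega
  rw [← Finset.add_sum_erase _ _ hmem, ← Finset.add_sum_erase _ _ hmem]
  have hcast : ((ρ.toNat : Nat) : Int) = ρ := by omega
  have h1 : (if ((ρ.toNat : Nat) : Int) < ρ + 1 then 0
      else tailSum (data.getD ρ.toNat []) (if ((ρ.toNat : Nat) : Int) = ρ + 1 then 0 else 0)) = 0 :=
    if_pos (by omega)
  rw [h1, zero_add]
  congr 1
  · rw [hcast, if_neg (by omega), if_pos rfl]
  · refine Finset.sum_congr rfl fun r hr => ?_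
    have hne : r ≠ ρ.toNat := (Finset.mem_erase.mp hr).1
    by_cases hlt2 : (r : Int) < ρ
    · rw [if_pos hlt2, if_pos (show (r : Int) < ρ + 1 by omega)]
    · rw [if_neg hlt2, if_neg (show ¬ ((r : Int) < ρ + 1) by omega),
        if_neg (show ¬ ((r : Int) = ρ) by omega), ite_self]

theorem F_neg {data : List (List Int)} {ρ col : Int} (h : ρ < 0) :
    F data ρ col = F data 0 0 := by
  unfold F
  refine Finset.sum_congr rfl fun r hr => ?_
  rw [if_neg (show ¬ ((r : Int) < ρ) by omega), if_neg (show ¬ ((r : Int) < 0) by omega),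
    if_neg (show ¬ ((r : Int) = ρ) by omega), ite_self]

-- the col-side hypothesis Pre_ provides for the first row A reads
theorem A_row {data : List (List Int)} :
    ∀ (fuel : Nat) (row col : Int), 0 ≤ row → (data.length : Int) ≤ row + fuel →
      (∀ cells ∈ PySem.List.pyGet? data row,
        ((cells.length : Int) ≤ col ∨ -(cells.length : Int) ≤ col)) →
      sum_odd_primes data row col = F data row col := by
  intro fuel
  induction fuel with
  | zero =>
    intro row col h0 hb _
    rw [A_stop (by omega), F_of_ge (by omega)]
  | succ fuel ih =>
    intro row col h0 hb hcol
    by_cases hge : (data.length : Int) ≤ row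
    · rw [A_stop hge, F_of_ge hge]
    · have hlt : row < (data.length : Int) := by omega
      have hget := PySem.List.pyGet?_eq_some_getElem data h0 hlt
      set cells := data[row.toNat]'(by omega) with hcells
      have hrec : sum_odd_primes data (row + 1) 0 = F data (row + 1) 0 := by
        apply ih (row + 1) 0 (by omega) (by omega)
        intro c hc
        right; omega
      have hgd : data.getD row.toNat [] = cells := List.getD_eq_getElem data [] (by omega)
      have hc := hcol cells (by rw [hget]; exact rfl)
      by_cases hcneg : col < 0
      · have hclb : -(cells.length : Int) ≤ col := by
          rcases hc with hc | hc
          · omega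
          · exact hc
        rw [A_col_neg hge hget col hclb (by omega),
          A_col_ge hge hget 0 (le_refl 0), hrec, F_peel h0 hlt, hgd,
          show tailSum cells col = tailSum cells 0 from tailSum_nonpos (by omega)]
      · rw [A_col_ge hge hget col (by omega), hrec, F_peel h0 hlt, hgd]

theorem A_neg {data : List (List Int)} :
    ∀ (fuel : Nat) (row col : Int), row < 0 → -(data.length : Int) ≤ row →
      (-row).toNat ≤ fuel →
      (∀ cells ∈ PySem.List.pyGet? data row,
        ((cells.length : Int) ≤ col ∨ -(cells.length : Int) ≤ col)) →
      sum_odd_primes data row col = F data ((data.length : Int) + row) col + F data 0 0 := by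
  intro fuel
  induction fuel with
  | zero => intro row col h1 h2 hb; omega
  | succ fuel ih =>
    intro row col h1 h2 hb hcol
    have hge : ¬ (data.length : Int) ≤ row := by omega
    have hidx : 0 ≤ (data.length : Int) + row := by omega
    have hlt : (data.length : Int) + row < (data.length : Int) := by omega
    obtain ⟨cells, hget⟩ : ∃ cells, PySem.List.pyGet? data row = some cells := by
      cases hpg : PySem.List.pyGet? data row with
      | some c => exact ⟨c, rfl⟩
      | none =>
        rw [PySem.List.pyGet?_eq_none_iff] at hpg
        exact absurd (by constructor <;> omega) hpg
    have hcells : cells = data.getD ((data.length : Int) + row).toNat [] := by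
      have hpg := PySem.List.pyGet?_neg_natCast data ((-row).toNat) (by omega) (by omega)
      rw [show -(((-row).toNat : Nat) : Int) = row by omega] at hpg
      rw [hpg] at hget
      rw [show data.length - (-row).toNat = ((data.length : Int) + row).toNat by omega] at hget
      rw [List.getD_eq_getElem data [] (by omega)]
      rw [List.getElem?_eq_getElem (show ((data.length : Int) + row).toNat < data.length by omega)] at hget
      exact (Option.some_injective _ hget).symm
    have hc := hcol cells (by rw [hget]; exact rfl)
    have hrest : sum_odd_primes data (row + 1) 0 =
        F data ((data.length : Int) + row + 1) 0 + F data 0 0 := by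
      by_cases hz : row + 1 = 0
      · rw [hz, A_row data.length 0 0 (le_refl 0) (by omega) (fun c _ => Or.inr (by omega))]
        have : (data.length : Int) + row + 1 = (data.length : Int) := by omega
        rw [this, F_of_ge (le_refl _), zero_add]
      · have := ih (row + 1) 0 (by omega) (by omega) (by omega)
          (fun c _ => Or.inr (by omega))
        rw [this]
        have : (data.length : Int) + (row + 1) = (data.length : Int) + row + 1 := by ring
        rw [this]
    by_cases hcneg : col < 0
    · have hclb : -(cells.length : Int) ≤ col := by
        rcases hc with hc | hc
        · omega
        · exact hc
      rw [A_col_neg hge hget col hclb (by omega), A_col_ge hge hget 0 (le_refl 0), hrest,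
        F_peel hidx hlt, ← hcells,
        show tailSum cells col = tailSum cells 0 from tailSum_nonpos (by omega)]
      ring
    · rw [A_col_ge hge hget col (by omega), hrest, F_peel hidx hlt, ← hcells]
      ring

-- ===== B-side reduction =====
theorem sum_map_enumerate {α : Type} (xs : List α) (d : α) (f : Int × α → Int) :
    ∀ (s : Int), ((PySem.List.enumerate xs s).map f).sum
      = ∑ k ∈ Finset.range xs.length, f (s + (k : Int), xs.getD k d) := by
  induction xs with
  | nil => intro s; simp [PySem.List.enumerate_nil]
  | cons x xs ih =>
    intro s
    rw [PySem.List.enumerate_cons, List.map_cons, List.sum_cons, ih (s + 1),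
      List.length_cons, Finset.sum_range_succ']
    have h1 : ∀ k : Nat, f (s + 1 + (k : Int), xs.getD k d)
        = f (s + ((k + 1 : Nat) : Int), (x :: xs).getD (k + 1) d) := by
      intro k
      have : s + 1 + (k : Int) = s + ((k + 1 : Nat) : Int) := by push_cast; ring
      rw [this]; rfl
    simp only [h1]
    have h0 : f (s, x) = f (s + ((0 : Nat) : Int), (x :: xs).getD 0 d) := by norm_num
    rw [h0]; ring

theorem pv_sum_map_filter_range (p : Nat → Bool) (g : Nat → Int) :
    ∀ W : Nat, (((List.range W).filter p).map g).sum
      = ∑ k ∈ Finset.range W, if p k then g k else 0 := by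
  intro W
  induction W with
  | zero => simp
  | succ W ih =>
    rw [List.range_succ, List.filter_append, List.map_append, List.sum_append, ih,
      Finset.sum_range_succ]
    by_cases hp : p W
    · simp [hp]
    · simp [hp]

theorem inner_sum_eq (cells : List Int) (W : Nat) (hW : cells.length ≤ W) (start : Int) :
    (((List.range W).filter (fun (c : Nat) => is_primeL (c : Int))).map
      (fun (c : Nat) =>
        if (c : Int) < (cells.length : Int) ∧ start ≤ (c : Int) then
          (if PySem.Int.mod (PySem.List.pyGetD cells (c : Int) 0) 2 = 1
           then PySem.List.pyGetD cells (c : Int) 0 else 0)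
        else 0)).sum = tailSum cells start := by
  rw [pv_sum_map_filter_range]
  unfold tailSum
  rw [← Finset.sum_subset (show Finset.range cells.length ⊆ Finset.range W from
    fun x hx => Finset.mem_range.mpr (lt_of_lt_of_le (Finset.mem_range.mp hx) hW)) (by
    intro k _ hk2
    have hk : ¬ k < cells.length := fun h => hk2 (Finset.mem_range.mpr h)
    by_cases hp : is_primeL (k : Int) = true
    · rw [if_pos hp, if_neg (by rintro ⟨h1, -⟩; omega)]
    · rw [if_neg hp])]
  refine Finset.sum_congr rfl fun k hk => ?_
  have hkn : k < cells.length := Finset.mem_range.mp hk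
  have hgd : PySem.List.pyGetD cells ((k : Nat) : Int) 0 = cells.getD k 0 :=
    PySem.List.pyGetD_natCast cells k 0
  rw [hgd]
  by_cases hp : is_primeL (k : Int) = true
  · by_cases hs : start ≤ (k : Int)
    · by_cases hm : PySem.Int.mod (cells.getD k 0) 2 = 1
      · rw [if_pos hp, if_pos ⟨by omega, hs⟩, if_pos hm, if_pos ⟨hs, hp, hm⟩]
      · rw [if_pos hp, if_pos ⟨by omega, hs⟩, if_neg hm,
          if_neg (by rintro ⟨-, -, h⟩; exact hm h)]
    · rw [if_pos hp, if_neg (by rintro ⟨-, h⟩; exact hs h),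
        if_neg (by rintro ⟨h, -, -⟩; exact hs h)]
  · rw [if_neg hp, if_neg (by rintro ⟨-, h, -⟩; exact hp h)]

theorem B_eq (data : List (List Int)) (row col : Int) :
    sum_odd_primes_alt data row col = F data row col := by
  unfold sum_odd_primes_alt
  simp only []
  have hinner : ∀ (p : Int × List Int) (total : Int),
      ((List.range (maxWidth data)).filter (fun (c : Nat) => is_primeL (c : Int))).foldl
        (fun (t : Int) (c : Nat) =>
          if (c : Int) < (p.2.length : Int) ∧ (if p.1 = row then col else 0) ≤ (c : Int) then
            (if PySem.Int.mod (PySem.List.pyGetD p.2 (c : Int) 0) 2 = 1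
             then t + PySem.List.pyGetD p.2 (c : Int) 0 else t)
          else t) total
      = total + (((List.range (maxWidth data)).filter (fun (c : Nat) => is_primeL (c : Int))).map
          (fun (c : Nat) =>
            if (c : Int) < (p.2.length : Int) ∧ (if p.1 = row then col else 0) ≤ (c : Int) then
              (if PySem.Int.mod (PySem.List.pyGetD p.2 (c : Int) 0) 2 = 1
               then PySem.List.pyGetD p.2 (c : Int) 0 else 0)
            else 0)).sum := by
    intro p total
    have hf : (fun (t : Int) (c : Nat) =>
        if (c : Int) < (p.2.length : Int) ∧ (if p.1 = row then col else 0) ≤ (c : Int) then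
          (if PySem.Int.mod (PySem.List.pyGetD p.2 (c : Int) 0) 2 = 1
           then t + PySem.List.pyGetD p.2 (c : Int) 0 else t)
        else t)
        = (fun (t : Int) (c : Nat) => t +
            (if (c : Int) < (p.2.length : Int) ∧ (if p.1 = row then col else 0) ≤ (c : Int) then
              (if PySem.Int.mod (PySem.List.pyGetD p.2 (c : Int) 0) 2 = 1
               then PySem.List.pyGetD p.2 (c : Int) 0 else 0)
            else 0)) := by
      funext t c
      by_cases h1 : ((c : Int) < (p.2.length : Int) ∧ (if p.1 = row then col else 0) ≤ (c : Int))
      · rw [if_pos h1, if_pos h1]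
        by_cases h2 : PySem.Int.mod (PySem.List.pyGetD p.2 (c : Int) 0) 2 = 1
        · rw [if_pos h2, if_pos h2]
        · rw [if_neg h2, if_neg h2]; ring
      · rw [if_neg h1, if_neg h1]; ring
    rw [hf, PySem.List.foldl_add]
  have houter : (fun (total : Int) (p : Int × List Int) =>
      if p.1 < row then total
      else ((List.range (maxWidth data)).filter (fun (c : Nat) => is_primeL (c : Int))).foldl
        (fun (t : Int) (c : Nat) =>
          if (c : Int) < (p.2.length : Int) ∧ (if p.1 = row then col else 0) ≤ (c : Int) then
            (if PySem.Int.mod (PySem.List.pyGetD p.2 (c : Int) 0) 2 = 1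
             then t + PySem.List.pyGetD p.2 (c : Int) 0 else t)
          else t) total)
      = (fun total p => total +
          (if p.1 < row then 0
           else (((List.range (maxWidth data)).filter (fun (c : Nat) => is_primeL (c : Int))).map
            (fun (c : Nat) =>
              if (c : Int) < (p.2.length : Int) ∧ (if p.1 = row then col else 0) ≤ (c : Int) then
                (if PySem.Int.mod (PySem.List.pyGetD p.2 (c : Int) 0) 2 = 1
                 then PySem.List.pyGetD p.2 (c : Int) 0 else 0)
              else 0)).sum)) := by
    funext total p
    by_cases hp : p.1 < row
    · rw [if_pos hp, if_pos hp]; ring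
    · rw [if_neg hp, if_neg hp, hinner p total]
  rw [houter, PySem.List.foldl_add, zero_add,
    sum_map_enumerate data ([] : List Int) _ 0]
  unfold F
  apply Finset.sum_congr rfl
  intro r hr
  have hr' : r < data.length := Finset.mem_range.mp hr
  have hmem : data.getD r [] ∈ data := by
    rw [List.getD_eq_getElem data [] hr']
    exact List.getElem_mem hr'
  have hW := le_maxWidth_of_mem hmem
  have harg : (0 : Int) + (r : Int) = (r : Int) := by ring
  rw [harg]
  by_cases hlt : (r : Int) < row
  · rw [if_pos hlt, if_pos hlt]
  · rw [if_neg hlt, if_neg hlt, inner_sum_eq _ _ hW]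

theorem pv_hcol {data : List (List Int)} {row col : Int}
    (hPre : Pre_sum_odd_primes data row col) :
    ∀ cells ∈ PySem.List.pyGet? data row,
      ((cells.length : Int) ≤ col ∨ -(cells.length : Int) ≤ col) := by
  rcases hPre with h | ⟨h1, h2⟩
  · intro c hc
    have hn : PySem.List.pyGet? data row = none := by
      rw [PySem.List.pyGet?_eq_none_iff]
      intro hIR
      cases hIR
      omega
    rw [hn] at hc
    cases hc
  · exact h2

theorem sum_odd_primes_spec : Claim_unchanged_sum_odd_primes := by
  intro data row col hDom hPre hnD
  have hcol := pv_hcol hPre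
  show sum_odd_primes data row col = sum_odd_primes_alt data row col
  rw [B_eq]
  by_cases hr : 0 ≤ row
  · exact A_row data.length row col hr (by omega) hcol
  · have hrow : row < 0 := by omega
    have h2 : -(data.length : Int) ≤ row := by
      rcases hPre with h | ⟨h1, _⟩
      · omega
      · exact h1
    have hz : F data ((data.length : Int) + row) col = 0 := by
      by_contra h
      exact hnD ⟨hrow, h⟩
    rw [A_neg (-row).toNat row col hrow h2 (le_refl _) hcol, F_neg hrow, hz, zero_add]

-- ===== VERDICT =====
set_option maxRecDepth 8000 in
theorem sum_odd_primes_changed : Claim_changed_sum_odd_primes := by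
  unfold Claim_changed_sum_odd_primes
  refine ⟨by decide, by decide, by decide, ?_, by decide, by decide⟩
  show sum_odd_primes [[0, 0, 3]] (-1) 0 = (6 : Int)
  rw [A_neg 1 (-1) 0 (by norm_num) (by norm_num) (by norm_num) (by decide)]
  decide

theorem sum_odd_primes_tight : Claim_exact_sum_odd_primes := by
  intro data row col hDom hPre hD
  obtain ⟨hrow, hne⟩ := hD
  have h2 : -(data.length : Int) ≤ row := by
    rcases hPre with h | ⟨h1, _⟩
    · omega
    · exact h1
  rw [A_neg (-row).toNat row col hrow h2 (le_refl _) (pv_hcol hPre), B_eq, F_neg hrow]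
  intro h
  exact hne (by omega)
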